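-- pv_equiv track=rewrite | github.com/hRun/TA_cryptosuite | bin/cipher.py | rot13_decrypt
-- ===== SOURCE A (Python) =====
-- def rot13_decrypt(fieldname, field, key):
--     try:
--         key = int(key)
--     except ValueError:
--         raise ValueError('Value for "key" must be an integer for ROT operations!')
--
--     try:
--         cipher = []
--         for i in range(len(field)):
--             unicode_repr = ord(field[i])
--             if unicode_repr >= 65 and unicode_repr <= 90: # A-Z
--                 cipher.append(chr(65 + ((unicode_repr - key - 65) % 26)))
--             elif unicode_repr >= 97 and unicode_repr <= 122: # a-z
--                 cipher.append(chr(97 + ((unicode_repr - key - 97) % 26)))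
--             else: # Skip characters outside the ASCII ranges
--                 cipher.append(field[i])
--         return ''.join(cipher)
--     except:
--         return field
-- ===== SOURCE B (Python) =====
-- def rot13_decrypt(fieldname, field, key):
--     try:
--         key = int(key)
--     except ValueError:
--         raise ValueError('Value for "key" must be an integer for ROT operations!')
--
--     s = key % 26
--     upper = 'ABCDEFGHIJKLMNOPQRSTUVWXYZ'
--     lower = 'abcdefghijklmnopqrstuvwxyz'
--     # Decrypting by `key` maps alphabet position i to position (i - s) % 26,
--     # which is just the alphabet rotated left by 26 - s; build it by slicing.
--     table = str.maketrans(upper + lower,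
--                           upper[26 - s:] + upper[:26 - s]
--                           + lower[26 - s:] + lower[:26 - s])
--     return field.translate(table)
-- ===== Notes on version B (the rewrite author's own statement) =====
-- stated objective: idiomatic
-- what changed: B reduces the key modulo 26 once and derives both substitution alphabets as slice-rotations of the plain alphabets, applying them with str.maketrans/str.translate, instead of A's per-character loop with range tests and modular arithmetic on every character.
import Mathlib
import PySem

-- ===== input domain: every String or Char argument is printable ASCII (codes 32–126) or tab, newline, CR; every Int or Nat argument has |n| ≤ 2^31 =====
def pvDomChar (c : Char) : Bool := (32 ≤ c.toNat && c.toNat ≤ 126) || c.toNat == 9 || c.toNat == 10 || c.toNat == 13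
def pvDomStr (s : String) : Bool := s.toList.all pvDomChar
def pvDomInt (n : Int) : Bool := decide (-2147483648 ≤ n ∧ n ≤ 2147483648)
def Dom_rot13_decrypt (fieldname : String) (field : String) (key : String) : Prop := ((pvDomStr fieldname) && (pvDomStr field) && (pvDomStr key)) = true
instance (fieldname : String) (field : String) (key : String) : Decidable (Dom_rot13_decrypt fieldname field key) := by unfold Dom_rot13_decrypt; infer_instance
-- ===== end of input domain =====

-- B reduces the key modulo 26 once and derives the substitution alphabets by slice-rotation of
-- the plain alphabets, applied via a translate table — no per-character arithmetic or branching.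
-- Both raise ValueError when int(key) fails; those inputs are outside Pre_.

-- ===== PORT A =====
-- the body of one loop iteration of A: append the (de)ciphered character for field[i]
def pvStepA (k : Int) (acc : List Char) (c : Char) : List Char :=
  let u : Int := (c.toNat : Int)
  if 65 ≤ u ∧ u ≤ 90 then acc ++ [Char.ofNat (65 + PySem.Int.mod (u - k - 65) 26).toNat]
  else if 97 ≤ u ∧ u ≤ 122 then acc ++ [Char.ofNat (97 + PySem.Int.mod (u - k - 97) 26).toNat]
  else acc ++ [c]

def rot13_decrypt (fieldname : String) (field : String) (key : String) : String :=
  match PySem.Int.ofStr? key with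
  | none => ""   -- Python raises ValueError here; excluded by Pre_
  | some k =>
    -- the inner try/except never fires for a string field: nothing in the loop can raise
    let fl := field.toList
    let cipher := (PySem.List.pyRange 0 (fl.length : Int) 1).foldl
      (fun acc i => pvStepA k acc (PySem.List.pyGetD fl i ' ')) []
    String.ofList cipher

-- ===== PORT B =====
def pvUpper : List Char := ['A', 'B', 'C', 'D', 'E', 'F', 'G', 'H', 'I', 'J', 'K', 'L', 'M', 'N', 'O', 'P', 'Q', 'R', 'S', 'T', 'U', 'V', 'W', 'X', 'Y', 'Z']
def pvLower : List Char := ['a', 'b', 'c', 'd', 'e', 'f', 'g', 'h', 'i', 'j', 'k', 'l', 'm', 'n', 'o', 'p', 'q', 'r', 's', 't', 'u', 'v', 'w', 'x', 'y', 'z']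

-- l[26-s:] ++ l[:26-s] — for 0 ≤ s < 26 and |l| = 26 the Python slices are exactly drop/take
def pvRotB (s : Nat) (l : List Char) : List Char := l.drop (26 - s) ++ l.take (26 - s)

-- str.maketrans(upper+lower, rotated upper + rotated lower): pair source with target, char-wise
def pvTableB (k : Int) : List (Char × Char) :=
  (pvUpper ++ pvLower).zip
    (pvRotB (PySem.Int.mod k 26).toNat pvUpper ++ pvRotB (PySem.Int.mod k 26).toNat pvLower)

-- str.translate: first (only) matching table entry, identity when absent
def pvTranslate (t : List (Char × Char)) (c : Char) : Char :=
  match t.find? (fun p => p.1 == c) with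
  | some p => p.2
  | none => c

def rot13_decrypt_alt (fieldname : String) (field : String) (key : String) : String :=
  match PySem.Int.ofStr? key with
  | none => ""   -- Python raises ValueError here; excluded by Pre_
  | some k => String.ofList (field.toList.map (pvTranslate (pvTableB k)))

-- ===== PRECONDITION & SPEC =====
-- Pre_ excludes exactly the keys int() rejects, on which both A and B raise ValueError.
def Pre_rot13_decrypt (fieldname : String) (field : String) (key : String) : Prop :=
  (PySem.Int.ofStr? key).isSome = true
instance (fieldname : String) (field : String) (key : String) : Decidable (Pre_rot13_decrypt fieldname field key) := by unfold Pre_rot13_decrypt; infer_instance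

def pvWitness_rot13_decrypt : String × String × String := ("f", "Uryyb, Jbeyq!", "13")

def Spec_rot13_decrypt (fieldname : String) (field : String) (key : String) (out : String) : Prop := out = rot13_decrypt_alt fieldname field key
instance (fieldname : String) (field : String) (key : String) (out : String) : Decidable (Spec_rot13_decrypt fieldname field key out) := by unfold Spec_rot13_decrypt; infer_instance

-- ===== CLAIM (what is proved, stated in full; the proofs are below) =====
def Claim_equal_rot13_decrypt : Prop := ∀ (fieldname : String) (field : String) (key : String), Dom_rot13_decrypt fieldname field key → Pre_rot13_decrypt fieldname field key → Spec_rot13_decrypt fieldname field key (rot13_decrypt fieldname field key)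

-- ===== LEMMAS AND PROOFS =====

lemma pvMod26_bounds (k : Int) : 0 ≤ PySem.Int.mod k 26 ∧ PySem.Int.mod k 26 < 26 := by
  rw [PySem.Int.mod_eq_emod_of_pos (by norm_num)]
  omega

-- the 26 alphabet letters, indexed
lemma pvUpper_getElem (i : Nat) (h : i < 26) :
    pvUpper[i]'(by simp [pvUpper]; omega) = Char.ofNat (65 + i) := by
  interval_cases i <;> rfl

lemma pvLower_getElem (i : Nat) (h : i < 26) :
    pvLower[i]'(by simp [pvLower]; omega) = Char.ofNat (97 + i) := by
  interval_cases i <;> rfl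

-- the slice-rotation is List.rotate
lemma pvRotB_eq_rotate (s : Nat) (hs : s < 26) (l : List Char) (hl : l.length = 26) :
    pvRotB s l = l.rotate (26 - s) := by
  unfold pvRotB
  rw [List.rotate_eq_drop_append_take (by omega)]

-- the rotated upper alphabet is the letter-wise decrypt map of the upper alphabet
lemma pvRotB_upper (k : Int) :
    pvRotB (PySem.Int.mod k 26).toNat pvUpper
      = pvUpper.map (fun c => Char.ofNat (65 + PySem.Int.mod ((c.toNat : Int) - k - 65) 26).toNat) := by
  have hmod : ∀ a : Int, PySem.Int.mod a 26 = a % 26 := fun a => PySem.Int.mod_eq_emod_of_pos (by norm_num)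
  obtain ⟨h0, h26⟩ := pvMod26_bounds k
  rw [hmod] at h0 h26
  rw [pvRotB_eq_rotate _ (by simp only [hmod]; omega) _ rfl]
  apply List.ext_getElem
  · simp [pvUpper]
  · intro i hi hi'
    have hi26 : i < 26 := by simpa [pvUpper] using hi'
    rw [List.getElem_rotate, List.getElem_map]
    have hlen : pvUpper.length = 26 := rfl
    simp only [hlen, hmod]
    rw [pvUpper_getElem _ (Nat.mod_lt _ (by norm_num)), pvUpper_getElem i hi26]
    have hc : (Char.ofNat (65 + i)).toNat = 65 + i := by interval_cases i <;> rfl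
    rw [hc]
    congr 1
    omega

lemma pvRotB_lower (k : Int) :
    pvRotB (PySem.Int.mod k 26).toNat pvLower
      = pvLower.map (fun c => Char.ofNat (97 + PySem.Int.mod ((c.toNat : Int) - k - 97) 26).toNat) := by
  have hmod : ∀ a : Int, PySem.Int.mod a 26 = a % 26 := fun a => PySem.Int.mod_eq_emod_of_pos (by norm_num)
  obtain ⟨h0, h26⟩ := pvMod26_bounds k
  rw [hmod] at h0 h26
  rw [pvRotB_eq_rotate _ (by simp only [hmod]; omega) _ rfl]
  apply List.ext_getElem
  · simp [pvLower]
  · intro i hi hi'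
    have hi26 : i < 26 := by simpa [pvLower] using hi'
    rw [List.getElem_rotate, List.getElem_map]
    have hlen : pvLower.length = 26 := rfl
    simp only [hlen, hmod]
    rw [pvLower_getElem _ (Nat.mod_lt _ (by norm_num)), pvLower_getElem i hi26]
    have hc : (Char.ofNat (97 + i)).toNat = 97 + i := by interval_cases i <;> rfl
    rw [hc]
    congr 1
    omega

-- zipping a list with its image under f pairs each element with its image
lemma zip_self_map {α β : Type} (l : List α) (f : α → β) :
    l.zip (l.map f) = l.map (fun a => (a, f a)) := by
  induction l with
  | nil => rfl
  | cons a t ih =>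
    show (a, f a) :: t.zip (t.map f) = _
    rw [ih]; rfl

-- find? for equality returns the element itself iff it is present
lemma find?_beq_eq {α : Type} [DecidableEq α] (l : List α) (c : α) :
    l.find? (fun a => a == c) = if c ∈ l then some c else none := by
  induction l with
  | nil => rfl
  | cons a t ih =>
    by_cases h : a = c
    · subst h; simp [List.find?]
    · rw [List.find?]
      have hb : (a == c) = false := beq_false_of_ne h
      simp only [hb, ih, List.mem_cons]
      simp [Ne.symm h]

lemma mem_pvUpper_iff (c : Char) : c ∈ pvUpper ↔ (65 ≤ c.toNat ∧ c.toNat ≤ 90) := by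
  constructor
  · intro h
    fin_cases h <;> decide
  · rintro ⟨h1, h2⟩
    obtain ⟨u, hu⟩ : ∃ u, c.toNat = u := ⟨_, rfl⟩
    rw [← Char.ofNat_toNat c, hu]
    rw [hu] at h1 h2
    interval_cases u <;> decide

lemma mem_pvLower_iff (c : Char) : c ∈ pvLower ↔ (97 ≤ c.toNat ∧ c.toNat ≤ 122) := by
  constructor
  · intro h
    fin_cases h <;> decide
  · rintro ⟨h1, h2⟩
    obtain ⟨u, hu⟩ : ∃ u, c.toNat = u := ⟨_, rfl⟩
    rw [← Char.ofNat_toNat c, hu]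
    rw [hu] at h1 h2
    interval_cases u <;> decide

-- per-character: B's table lookup computes exactly A's branch formulas
lemma translate_char (k : Int) (c : Char) :
    pvTranslate (pvTableB k) c =
      if 65 ≤ (c.toNat : Int) ∧ (c.toNat : Int) ≤ 90 then
        Char.ofNat (65 + PySem.Int.mod ((c.toNat : Int) - k - 65) 26).toNat
      else if 97 ≤ (c.toNat : Int) ∧ (c.toNat : Int) ≤ 122 then
        Char.ofNat (97 + PySem.Int.mod ((c.toNat : Int) - k - 97) 26).toNat
      else c := by
  unfold pvTranslate pvTableB
  rw [pvRotB_upper, pvRotB_lower,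
      List.zip_append (by simp), zip_self_map, zip_self_map,
      List.find?_append, List.find?_map, List.find?_map]
  have hu := find?_beq_eq pvUpper c
  have hl := find?_beq_eq pvLower c
  simp only [Function.comp_def] at *
  rw [hu, hl]
  simp only [mem_pvUpper_iff, mem_pvLower_iff]
  split_ifs <;> first | rfl | (exfalso; omega)

lemma stepA_eq_translate (k : Int) (acc : List Char) (c : Char) :
    pvStepA k acc c = acc ++ [pvTranslate (pvTableB k) c] := by
  rw [translate_char]
  simp only [pvStepA]
  split_ifs <;> rfl

-- ===== VERDICT =====
theorem rot13_decrypt_spec : Claim_equal_rot13_decrypt := by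
  intro fieldname field key _ hpre
  unfold Spec_rot13_decrypt rot13_decrypt rot13_decrypt_alt
  obtain ⟨k, hk⟩ := Option.isSome_iff_exists.mp hpre
  rw [hk]
  simp only [PySem.List.foldl_pyRange_zero_pyGetD' field.toList ' '
      (fun acc c => pvStepA k acc c) []]
  simp only [stepA_eq_translate]
  rw [PySem.List.foldl_append_singleton_eq_map]
  simp
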